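-- pv_equiv track=rewrite | github.com/sp4398/100-Days-of-Coding | 14-FamilyStructure.py | kthChildNthGeneration
-- ===== SOURCE A (Python) =====
-- def kthChildNthGeneration(n, k):
--     # Write your code here
--     if n==1 or k==1:
--         return "Male"
--
--     parent=(k+1)//2
--     parent_gender= kthChildNthGeneration(n-1,parent)
--     if k==(2*parent)-1:
--         return parent_gender
--     else:
--         if parent_gender=="Male":
--             return "Female"
--         else:
--             return "Male"
-- ===== SOURCE B (Python) =====
-- def kthChildNthGeneration(n, k):
--     flips = 0
--     while n != 1 and k != 1:
--         if k % 2 == 0: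
--             flips += 1
--         k = (k + 1) // 2
--         n -= 1
--     return "Male" if flips % 2 == 0 else "Female"
-- ===== Notes on version B (the rewrite author's own statement) =====
-- stated objective: alternative
-- what changed: Replaces the recursive unwinding of parent genders by an iterative while-loop that keeps a running (n,k) state and counts gender flips (k even), returning by flip parity.
-- outside the precondition, e.g. on kthChildNthGeneration(5, 0): A returns 'Male', B returns 'Male'
import Mathlib
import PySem

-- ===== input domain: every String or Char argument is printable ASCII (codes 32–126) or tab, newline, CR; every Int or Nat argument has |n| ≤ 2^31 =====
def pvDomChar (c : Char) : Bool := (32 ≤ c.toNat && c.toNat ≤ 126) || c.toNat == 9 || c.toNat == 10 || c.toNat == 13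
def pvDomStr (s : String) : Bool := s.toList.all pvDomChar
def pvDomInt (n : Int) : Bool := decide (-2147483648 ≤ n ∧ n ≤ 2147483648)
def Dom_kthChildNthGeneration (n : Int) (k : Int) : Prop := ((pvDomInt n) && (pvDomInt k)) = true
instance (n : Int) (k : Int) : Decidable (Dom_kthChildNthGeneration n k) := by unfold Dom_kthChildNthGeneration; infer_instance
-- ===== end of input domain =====

-- B replaces A's recursion by an iterative loop counting gender flips; an alternative decomposition, not faster.


-- ===== PORT A =====
-- fuel makes the recursion total in Lean; on Pre_ (1 ≤ k) the fuel n.toNat + k.toNat is never exhausted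
def kthA : Nat → Int → Int → String
  | 0, _, _ => "Male"
  | f+1, n, k =>
    if n = 1 ∨ k = 1 then "Male"
    else
      let parent := PySem.Int.floordiv (k+1) 2
      let parent_gender := kthA f (n-1) parent
      if k = 2*parent - 1 then parent_gender
      else if parent_gender = "Male" then "Female" else "Male"

def kthChildNthGeneration (n : Int) (k : Int) : String := kthA (n.toNat + k.toNat) n k

-- ===== PORT B =====
-- the while-loop of Source B, with the same fuel bound making it total
def kthB : Nat → Int → Int → Int → String
  | 0, _, _, flips => if PySem.Int.mod flips 2 = 0 then "Male" else "Female"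
  | f+1, n, k, flips =>
    if n ≠ 1 ∧ k ≠ 1 then
      kthB f (n-1) (PySem.Int.floordiv (k+1) 2)
        (flips + (if PySem.Int.mod k 2 = 0 then 1 else 0))
    else if PySem.Int.mod flips 2 = 0 then "Male" else "Female"

def kthChildNthGeneration_alt (n : Int) (k : Int) : String := kthB (n.toNat + k.toNat) n k 0

-- ===== PRECONDITION & SPEC =====
-- Pre_ excludes k ≤ 0, where A's recursion depth is n−1 so it raises RecursionError for all but
-- small n (and recurses forever for n ≤ 0); on the small n where A still returns, B returns the same value.
def Pre_kthChildNthGeneration (n : Int) (k : Int) : Prop := 1 ≤ k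
instance (n : Int) (k : Int) : Decidable (Pre_kthChildNthGeneration n k) := by unfold Pre_kthChildNthGeneration; infer_instance
def pvWitness_kthChildNthGeneration : Int × Int := (3, 2)

def Spec_kthChildNthGeneration (n : Int) (k : Int) (out : String) : Prop := out = kthChildNthGeneration_alt n k
instance (n : Int) (k : Int) (out : String) : Decidable (Spec_kthChildNthGeneration n k out) := by unfold Spec_kthChildNthGeneration; infer_instance

-- ===== CLAIM (what is proved, stated in full; the proofs are below) =====
def Claim_equal_kthChildNthGeneration : Prop := ∀ (n : Int) (k : Int), Dom_kthChildNthGeneration n k → Pre_kthChildNthGeneration n k → Spec_kthChildNthGeneration n k (kthChildNthGeneration n k)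

-- ===== LEMMAS AND PROOFS =====

-- flipping the result by the parity of the accumulated flip count
def flipS (flips : Int) (s : String) : String :=
  if PySem.Int.mod flips 2 = 0 then s else if s = "Male" then "Female" else "Male"

theorem ranA (f : Nat) (n k : Int) : kthA f n k = "Male" ∨ kthA f n k = "Female" := by
  induction f generalizing n k with
  | zero => left; rfl
  | succ f ih =>
    simp only [kthA]
    split
    · left; rfl
    · split
      · exact ih _ _
      · split
        · right; rfl
        · left; rfl

theorem kthB_eq_flip (f : Nat) : ∀ (n k flips : Int), 1 ≤ k → k.toNat ≤ f →
    kthB f n k flips = flipS flips (kthA f n k) := by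
  induction f with
  | zero => intro n k flips hk hf; omega
  | succ f ih =>
    intro n k flips hk hf
    by_cases hbase : n = 1 ∨ k = 1
    · have hcond : ¬ (n ≠ 1 ∧ k ≠ 1) := by tauto
      simp only [kthA, kthB, if_pos hbase, if_neg hcond, flipS]
      split <;> simp
    · have hcond : n ≠ 1 ∧ k ≠ 1 := by tauto
      have hk2 : 2 ≤ k := by omega
      have hfd : PySem.Int.floordiv (k+1) 2 = (k+1) / 2 :=
        PySem.Int.floordiv_eq_ediv_of_pos (by omega)
      have hmd : PySem.Int.mod k 2 = k % 2 := PySem.Int.mod_eq_emod_of_pos (by omega)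
      set p := PySem.Int.floordiv (k+1) 2 with hp
      have hp1 : 1 ≤ p := by rw [hfd] at hp; omega
      have hple : p ≤ k - 1 := by rw [hfd] at hp; omega
      have hps : p.toNat ≤ f := by omega
      simp only [kthA, kthB, if_neg hbase, if_pos hcond]
      rw [ih (n-1) p _ hp1 hps]
      rcases ranA f (n-1) p with hg | hg
      · by_cases hodd : k = 2*p - 1
        · have he : PySem.Int.mod k 2 ≠ 0 := by rw [hmd]; omega
          simp [hodd, hg]
        · have he : PySem.Int.mod k 2 = 0 := by rw [hmd]; rw [hfd] at hp; omega
          have hpar : (PySem.Int.mod (flips+1) 2 = 0) ↔ ¬ (PySem.Int.mod flips 2 = 0) := by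
            rw [PySem.Int.mod_eq_emod_of_pos (by omega), PySem.Int.mod_eq_emod_of_pos (by omega)]
            omega
          simp only [he, if_pos, flipS, hg]
          by_cases h0 : PySem.Int.mod flips 2 = 0 <;> simp_all
      · by_cases hodd : k = 2*p - 1
        · have he : PySem.Int.mod k 2 ≠ 0 := by rw [hmd]; omega
          simp [hodd, hg]
        · have he : PySem.Int.mod k 2 = 0 := by rw [hmd]; rw [hfd] at hp; omega
          have hpar : (PySem.Int.mod (flips+1) 2 = 0) ↔ ¬ (PySem.Int.mod flips 2 = 0) := by
            rw [PySem.Int.mod_eq_emod_of_pos (by omega), PySem.Int.mod_eq_emod_of_pos (by omega)]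
            omega
          simp only [he, if_pos, flipS, hg]
          by_cases h0 : PySem.Int.mod flips 2 = 0 <;> simp_all

-- ===== VERDICT (by name: the statement is the Claim_ definition above) =====
theorem kthChildNthGeneration_spec : Claim_equal_kthChildNthGeneration := by
  intro n k _ hpre
  unfold Spec_kthChildNthGeneration kthChildNthGeneration kthChildNthGeneration_alt
  rw [kthB_eq_flip (n.toNat + k.toNat) n k 0 hpre (by omega)]
  simp [flipS, PySem.Int.mod]
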